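-- pv_equiv track=rewrite | github.com/BKJackson/dataagent | data_agent.py | _assess_analysis_depth
-- ===== SOURCE A (Python) =====
-- def _assess_analysis_depth(results):
--     """Assess the depth of analysis performed (1-5 scale)."""
--     depth = 1
--
--     if any(key in results for key in ['dataset_info', 'summary_stats']):
--         depth = 1
--     if any(key in results for key in ['correlations', 'geographic_analysis', 'time_series']):
--         depth = 2
--     if any(key in results for key in ['clustering_results', 'anomaly_scores', 'pattern_analysis']):
--         depth = 3
--     if any(key in results for key in ['robustness_checks', 'causal_pathways', 'confounder_analysis']):
--         depth = 4
--     if 'methods_used' in results: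
--         depth += 1
--
--     return min(depth, 5)
-- ===== SOURCE B (Python) =====
-- # B: one pass over the result keys with a key->level lookup table, instead of
-- # scanning fixed key groups against the dict four times (alternative decomposition).
-- KEY_LEVEL = {
--     'correlations': 2, 'geographic_analysis': 2, 'time_series': 2,
--     'clustering_results': 3, 'anomaly_scores': 3, 'pattern_analysis': 3,
--     'robustness_checks': 4, 'causal_pathways': 4, 'confounder_analysis': 4,
-- }
--
-- def _assess_analysis_depth(results):
--     depth = 1
--     bonus = 0
--     for key in results:
--         if key == 'methods_used':
--             bonus = 1
--         else:
--             level = KEY_LEVEL.get(key, 1)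
--             if level > depth:
--                 depth = level
--     return min(depth + bonus, 5)
-- ===== Notes on version B (the rewrite author's own statement) =====
-- stated objective: alternative
-- what changed: Instead of testing four fixed key groups for membership in the dict, B makes a single pass over the dict's keys, looking each key up in a key-to-level table and keeping the running maximum level plus a methods_used flag.
import Mathlib
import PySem

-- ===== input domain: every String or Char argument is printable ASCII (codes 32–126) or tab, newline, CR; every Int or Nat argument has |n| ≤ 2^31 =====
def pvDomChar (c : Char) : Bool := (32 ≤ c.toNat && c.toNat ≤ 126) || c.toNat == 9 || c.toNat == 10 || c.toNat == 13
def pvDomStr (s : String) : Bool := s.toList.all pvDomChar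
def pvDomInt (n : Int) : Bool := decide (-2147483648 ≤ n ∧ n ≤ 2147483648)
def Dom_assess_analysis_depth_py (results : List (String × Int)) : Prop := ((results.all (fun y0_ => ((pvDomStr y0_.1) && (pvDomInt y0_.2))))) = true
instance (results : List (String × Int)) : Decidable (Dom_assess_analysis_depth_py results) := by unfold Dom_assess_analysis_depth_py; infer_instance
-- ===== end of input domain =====

-- B replaces A's four membership scans of fixed key groups by one pass over the dict's keys with a key→level lookup table.
-- ===== PORT A =====
-- 'key in results' on a Python dict = some pair has that key
def pvHasKey (results : List (String × Int)) (k : String) : Bool :=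
  results.any (fun p => p.1 == k)

def assess_analysis_depth_py (results : List (String × Int)) : Int :=
  let depth : Int := 1
  let depth := if ["dataset_info", "summary_stats"].any (fun key => pvHasKey results key) then 1 else depth
  let depth := if ["correlations", "geographic_analysis", "time_series"].any (fun key => pvHasKey results key) then 2 else depth
  let depth := if ["clustering_results", "anomaly_scores", "pattern_analysis"].any (fun key => pvHasKey results key) then 3 else depth
  let depth := if ["robustness_checks", "causal_pathways", "confounder_analysis"].any (fun key => pvHasKey results key) then 4 else depth
  let depth := if pvHasKey results "methods_used" then depth + 1 else depth
  min depth 5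

-- ===== PORT B =====
def pvKEY_LEVEL : PySem.Dict String Int :=
  PySem.Dict.ofList
    [("correlations", 2), ("geographic_analysis", 2), ("time_series", 2),
     ("clustering_results", 3), ("anomaly_scores", 3), ("pattern_analysis", 3),
     ("robustness_checks", 4), ("causal_pathways", 4), ("confounder_analysis", 4)]

-- the loop body: state = (depth, bonus)
def pvStep (st : Int × Int) (p : String × Int) : Int × Int :=
  if p.1 == "methods_used" then (st.1, 1)
  else
    let level := pvKEY_LEVEL.getD p.1 1
    if level > st.1 then (level, st.2) else st

def assess_analysis_depth_py_alt (results : List (String × Int)) : Int :=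
  let st := results.foldl pvStep (1, 0)
  min (st.1 + st.2) 5

-- ===== PRECONDITION & SPEC =====
def Spec_assess_analysis_depth_py (results : List (String × Int)) (out : Int) : Prop := out = assess_analysis_depth_py_alt results
instance (results : List (String × Int)) (out : Int) : Decidable (Spec_assess_analysis_depth_py results out) := by unfold Spec_assess_analysis_depth_py; infer_instance

-- ===== CLAIM (what is proved, stated in full; the proofs are below) =====
def Claim_equal_assess_analysis_depth_py : Prop := ∀ (results : List (String × Int)), Dom_assess_analysis_depth_py results → Spec_assess_analysis_depth_py results (assess_analysis_depth_py results)

-- ===== LEMMAS AND PROOFS =====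

-- the maximum matched level, as the if-chain A's overwriting ifs compute
def pvV (r : List (String × Int)) : Int :=
  if pvHasKey r "robustness_checks" || pvHasKey r "causal_pathways" || pvHasKey r "confounder_analysis" then 4
  else if pvHasKey r "clustering_results" || pvHasKey r "anomaly_scores" || pvHasKey r "pattern_analysis" then 3
  else if pvHasKey r "correlations" || pvHasKey r "geographic_analysis" || pvHasKey r "time_series" then 2
  else 1

lemma pvHasKey_cons (k : String) (v : Int) (t : List (String × Int)) (key : String) :
    pvHasKey ((k, v) :: t) key = ((k == key) || pvHasKey t key) := by
  simp [pvHasKey]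

lemma keyLevel_eq (k : String) :
    pvKEY_LEVEL.getD k 1 =
      (if k == "correlations" then 2 else if k == "geographic_analysis" then 2
       else if k == "time_series" then 2 else if k == "clustering_results" then 3
       else if k == "anomaly_scores" then 3 else if k == "pattern_analysis" then 3
       else if k == "robustness_checks" then 4 else if k == "causal_pathways" then 4
       else if k == "confounder_analysis" then 4 else 1) := by
  have h : pvKEY_LEVEL = PySem.Dict.mk
    [("correlations", 2), ("geographic_analysis", 2), ("time_series", 2),
     ("clustering_results", 3), ("anomaly_scores", 3), ("pattern_analysis", 3),
     ("robustness_checks", 4), ("causal_pathways", 4), ("confounder_analysis", 4)] := by decide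
  rw [h, PySem.Dict.getD_eq_get?_getD]
  simp only [PySem.Dict.get?_mk_cons]
  by_cases h1 : k = "correlations"
  · subst h1; decide
  by_cases h2 : k = "geographic_analysis"
  · subst h2; decide
  by_cases h3 : k = "time_series"
  · subst h3; decide
  by_cases h4 : k = "clustering_results"
  · subst h4; decide
  by_cases h5 : k = "anomaly_scores"
  · subst h5; decide
  by_cases h6 : k = "pattern_analysis"
  · subst h6; decide
  by_cases h7 : k = "robustness_checks"
  · subst h7; decide
  by_cases h8 : k = "causal_pathways"
  · subst h8; decide
  by_cases h9 : k = "confounder_analysis"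
  · subst h9; decide
  have e1 : (("correlations":String) == k) = false := by simp [Ne.symm h1]
  have e2 : (("geographic_analysis":String) == k) = false := by simp [Ne.symm h2]
  have e3 : (("time_series":String) == k) = false := by simp [Ne.symm h3]
  have e4 : (("clustering_results":String) == k) = false := by simp [Ne.symm h4]
  have e5 : (("anomaly_scores":String) == k) = false := by simp [Ne.symm h5]
  have e6 : (("pattern_analysis":String) == k) = false := by simp [Ne.symm h6]
  have e7 : (("robustness_checks":String) == k) = false := by simp [Ne.symm h7]
  have e8 : (("causal_pathways":String) == k) = false := by simp [Ne.symm h8]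
  have e9 : (("confounder_analysis":String) == k) = false := by simp [Ne.symm h9]
  simp [e1, e2, e3, e4, e5, e6, e7, e8, e9, h1, h2, h3, h4, h5, h6, h7, h8, h9, PySem.Dict.get?]

lemma pvV_cons (k : String) (v : Int) (t : List (String × Int))
    (hm : (k == "methods_used") = false) :
    pvV ((k, v) :: t) = max (pvKEY_LEVEL.getD k 1) (pvV t) := by
  rw [keyLevel_eq]
  simp only [pvV, pvHasKey_cons]
  by_cases h1 : k = "correlations"
  · subst h1; simp; split_ifs <;> omega
  by_cases h2 : k = "geographic_analysis"
  · subst h2; simp; split_ifs <;> omega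
  by_cases h3 : k = "time_series"
  · subst h3; simp; split_ifs <;> omega
  by_cases h4 : k = "clustering_results"
  · subst h4; simp; split_ifs <;> omega
  by_cases h5 : k = "anomaly_scores"
  · subst h5; simp; split_ifs <;> omega
  by_cases h6 : k = "pattern_analysis"
  · subst h6; simp; split_ifs <;> omega
  by_cases h7 : k = "robustness_checks"
  · subst h7; simp; split_ifs <;> omega
  by_cases h8 : k = "causal_pathways"
  · subst h8; simp; split_ifs <;> omega
  by_cases h9 : k = "confounder_analysis"
  · subst h9; simp; split_ifs <;> omega
  simp [h1, h2, h3, h4, h5, h6, h7, h8, h9]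
  split_ifs <;> omega

lemma loop_spec (r : List (String × Int)) : ∀ (d bonus : Int), 1 ≤ d →
    r.foldl pvStep (d, bonus) =
      (max d (pvV r), if pvHasKey r "methods_used" then (1 : Int) else bonus) := by
  induction r with
  | nil =>
      intro d bonus hd
      simp [pvHasKey, pvV]
      omega
  | cons p t ih =>
      intro d bonus hd
      obtain ⟨k, v⟩ := p
      rw [List.foldl_cons]
      by_cases hm : k = "methods_used"
      · have hb : (k == "methods_used") = true := by simp [hm]
        have hstep : pvStep (d, bonus) (k, v) = (d, 1) := by simp [pvStep, hb]
        rw [hstep, ih d 1 hd]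
        have hV : pvV ((k, v) :: t) = pvV t := by
          subst hm; simp [pvV, pvHasKey_cons]
        rw [hV, pvHasKey_cons]
        subst hm; simp
      · have hb : (k == "methods_used") = false := by simp [hm]
        have hstep : pvStep (d, bonus) (k, v) =
            (max d (pvKEY_LEVEL.getD k 1), bonus) := by
          simp only [pvStep, hb, Bool.false_eq_true, if_false]
          split_ifs <;> simp <;> omega
        have hlvl := (keyLevel_eq k)
        have hlb : 1 ≤ pvKEY_LEVEL.getD k 1 := by rw [hlvl]; split_ifs <;> omega
        rw [hstep, ih (max d (pvKEY_LEVEL.getD k 1)) bonus (by omega)]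
        rw [pvV_cons k v t hb, pvHasKey_cons]
        simp [hb, max_assoc]
        try omega

-- ===== VERDICT (by name: the statement is the Claim_ definition above) =====
theorem assess_analysis_depth_py_spec : Claim_equal_assess_analysis_depth_py := by
  intro results _
  unfold Spec_assess_analysis_depth_py assess_analysis_depth_py assess_analysis_depth_py_alt
  rw [loop_spec results 1 0 (by omega)]
  simp only [List.any_cons, List.any_nil, Bool.or_false]
  unfold pvV
  generalize pvHasKey results "methods_used" = bm
  generalize pvHasKey results "dataset_info" = b0a
  generalize pvHasKey results "summary_stats" = b0b
  generalize pvHasKey results "correlations" = b2a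
  generalize pvHasKey results "geographic_analysis" = b2b
  generalize pvHasKey results "time_series" = b2c
  generalize pvHasKey results "clustering_results" = b3a
  generalize pvHasKey results "anomaly_scores" = b3b
  generalize pvHasKey results "pattern_analysis" = b3c
  generalize pvHasKey results "robustness_checks" = b4a
  generalize pvHasKey results "causal_pathways" = b4b
  generalize pvHasKey results "confounder_analysis" = b4c
  cases b0a <;> cases b0b <;> cases b2a <;> cases b2b <;> cases b2c <;> cases b3a <;>
    cases b3b <;> cases b3c <;> cases b4a <;> cases b4b <;> cases b4c <;> cases bm <;> decide
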